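-- pv_equiv track=rewrite | github.com/vit-aborigen/CIO_woplugin | Square Board.py | square_board
-- ===== SOURCE A (Python) =====
-- def square_board(side: int, token: int, steps: int):
--     directions, current_direction = [[0, -1], [-1,0], [0, 1], [1, 0]], 0
--     i, j, current_value = side - 1, side - 1, 0
--     max_value = 2 * side + 2 * (side - 2)
--     goal = abs((steps + token) % max_value)
--     while current_value != goal:
--         i += directions[current_direction][0]
--         j += directions[current_direction][1]
--         current_value += 1
--         if not current_value % (side - 1):
--             current_direction = (current_direction + 1) % 4
--     return (i,j)
-- ===== SOURCE B (Python) =====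
-- def square_board(side: int, token: int, steps: int):
--     e = side - 1
--     g = (steps + token) % (4 * e)
--     q, r = divmod(g, e)
--     if q == 0:
--         return (e, e - r)
--     if q == 1:
--         return (e - r, 0)
--     if q == 2:
--         return (0, r)
--     return (r, e)
-- ===== Notes on version B (the rewrite author's own statement) =====
-- stated objective: faster
-- what changed: Replaces A's step-by-step O(side) walk around the board perimeter with O(1) arithmetic: divmod of the goal by (side-1) picks the edge and the offset along it.
-- outside the precondition, e.g. on square_board(0, 0, 5): A returns (-2, -1), B returns (0, -1); on square_board(1, 0, 0): A raises ZeroDivisionError, B raises ZeroDivisionError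
import Mathlib
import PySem

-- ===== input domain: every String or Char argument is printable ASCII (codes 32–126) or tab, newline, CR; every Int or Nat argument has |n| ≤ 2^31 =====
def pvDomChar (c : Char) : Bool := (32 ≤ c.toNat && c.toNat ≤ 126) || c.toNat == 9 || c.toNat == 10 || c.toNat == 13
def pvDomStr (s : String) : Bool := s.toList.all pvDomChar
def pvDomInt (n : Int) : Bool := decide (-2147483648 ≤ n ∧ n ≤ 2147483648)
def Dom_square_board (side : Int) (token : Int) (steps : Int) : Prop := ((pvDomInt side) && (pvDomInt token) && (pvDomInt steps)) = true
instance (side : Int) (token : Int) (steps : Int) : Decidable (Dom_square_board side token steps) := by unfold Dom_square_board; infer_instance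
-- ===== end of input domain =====

-- B replaces A's step-by-step walk around the perimeter (O(side) loop) by O(1) arithmetic:
-- divmod of the goal by (side-1) selects the edge and the offset along it.

-- ===== PORT A =====
-- the directions table of A
def sbDirections : List (Int × Int) := [(0, -1), (-1, 0), (0, 1), (1, 0)]

-- the while loop of A; fuel bounds the iterations (goal+1 suffices since current_value
-- starts at 0 and increases by exactly 1 per iteration; Python diverges only when goal < 0,
-- which Pre_ excludes)
def sbLoop (side goal : Int) : Nat → Int → Int → Int → Int → Int × Int
  | 0, _, i, j, _ => (i, j)
  | fuel + 1, cd, i, j, cv =>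
    if cv = goal then (i, j)
    else
      let d := (PySem.List.pyGet? sbDirections cd).getD (0, 0)
      let i' := i + d.1
      let j' := j + d.2
      let cv' := cv + 1
      let cd' := if PySem.Int.mod cv' (side - 1) = 0 then PySem.Int.mod (cd + 1) 4 else cd
      sbLoop side goal fuel cd' i' j' cv'

def square_board (side : Int) (token : Int) (steps : Int) : Int × Int :=
  let maxValue := 2 * side + 2 * (side - 2)
  let goal := |PySem.Int.mod (steps + token) maxValue|
  sbLoop side goal (goal.toNat + 1) 0 (side - 1) (side - 1) 0

-- ===== PORT B =====
def square_board_alt (side : Int) (token : Int) (steps : Int) : Int × Int :=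
  let e := side - 1
  let g := PySem.Int.mod (steps + token) (4 * e)
  let q := PySem.Int.floordiv g e
  let r := PySem.Int.mod g e
  if q = 0 then (e, e - r)
  else if q = 1 then (e - r, 0)
  else if q = 2 then (0, r)
  else (r, e)

-- ===== PRECONDITION & SPEC =====
-- Pre_ restricts to the natural domain of a square board: side = 1 makes A raise
-- ZeroDivisionError, and side ≤ 0 makes A return coordinates of a nonexistent board
-- (a negative perimeter walked with a negative modulus) — outside the function's purpose.
def Pre_square_board (side : Int) (token : Int) (steps : Int) : Prop := 2 ≤ side
instance (side : Int) (token : Int) (steps : Int) : Decidable (Pre_square_board side token steps) := by unfold Pre_square_board; infer_instance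
def pvWitness_square_board : Int × Int × Int := (5, 3, 10)

def Spec_square_board (side : Int) (token : Int) (steps : Int) (out : Int × Int) : Prop := out = square_board_alt side token steps
instance (side : Int) (token : Int) (steps : Int) (out : Int × Int) : Decidable (Spec_square_board side token steps out) := by unfold Spec_square_board; infer_instance

-- ===== CLAIM (what is proved, stated in full; the proofs are below) =====
def Claim_equal_square_board : Prop := ∀ (side : Int) (token : Int) (steps : Int), Dom_square_board side token steps → Pre_square_board side token steps → Spec_square_board side token steps (square_board side token steps)

-- ===== LEMMAS AND PROOFS =====

-- the loop invariant: after cv steps the walker is on edge cv/(side-1) at the stated spot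
def SB_State (side cv cd i j : Int) : Prop :=
  let e := side - 1
  (0 ≤ cv ∧ cv < e ∧ cd = 0 ∧ i = e ∧ j = e - cv) ∨
  (e ≤ cv ∧ cv < 2 * e ∧ cd = 1 ∧ i = 2 * e - cv ∧ j = 0) ∨
  (2 * e ≤ cv ∧ cv < 3 * e ∧ cd = 2 ∧ i = 0 ∧ j = cv - 2 * e) ∨
  (3 * e ≤ cv ∧ cv < 4 * e ∧ cd = 3 ∧ i = cv - 3 * e ∧ j = e)

-- closed-form final position, in interval form
def sbFinal (side g : Int) : Int × Int :=
  if g < side - 1 then (side - 1, side - 1 - g)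
  else if g < 2 * (side - 1) then (2 * (side - 1) - g, 0)
  else if g < 3 * (side - 1) then (0, g - 2 * (side - 1))
  else (g - 3 * (side - 1), side - 1)

lemma sb_state_final (side g cd i j : Int) (h : SB_State side g cd i j) :
    (i, j) = sbFinal side g := by
  unfold SB_State at h
  unfold sbFinal
  rcases h with ⟨_, h2, _, h4, h5⟩ | ⟨h1, h2, _, h4, h5⟩ | ⟨h1, h2, _, h4, h5⟩ | ⟨h1, _, _, h4, h5⟩ <;>
    subst h4 <;> subst h5 <;> split_ifs <;> first | rfl | (exfalso; omega)

lemma sb_mod_boundary {e c : Int} (he : 0 < e) (h : e ∣ c) : PySem.Int.mod c e = 0 :=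
  (PySem.Int.mod_eq_zero_iff_dvd c e).mpr h

lemma sb_mod_interior {e c k : Int} (he : 0 < e) (hlo : k * e < c) (hhi : c < (k + 1) * e) :
    PySem.Int.mod c e ≠ 0 := by
  have hq : PySem.Int.floordiv c e = k :=
    (PySem.Int.floordiv_eq_iff_of_pos he).mpr ⟨by omega, hhi⟩
  have hm := PySem.Int.floordiv_mul_add_mod c e
  rw [hq] at hm
  omega

-- one iteration of the loop body preserves the invariant
lemma sb_step (side cv cd i j : Int) (hs : 2 ≤ side) (hcv : cv + 1 < 4 * (side - 1))
    (h : SB_State side cv cd i j) :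
    SB_State side (cv + 1)
      (if PySem.Int.mod (cv + 1) (side - 1) = 0 then PySem.Int.mod (cd + 1) 4 else cd)
      (i + ((PySem.List.pyGet? sbDirections cd).getD (0, 0)).1)
      (j + ((PySem.List.pyGet? sbDirections cd).getD (0, 0)).2) := by
  have he : (0 : Int) < side - 1 := by omega
  unfold SB_State at h ⊢
  rcases h with ⟨h1, h2, h3, h4, h5⟩ | ⟨h1, h2, h3, h4, h5⟩ | ⟨h1, h2, h3, h4, h5⟩ | ⟨h1, h2, h3, h4, h5⟩ <;>
    subst h3 <;> subst h4 <;> subst h5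
  · -- edge 0, moving (0,-1)
    simp only [show (PySem.List.pyGet? sbDirections 0).getD (0, 0) = ((0 : Int), (-1 : Int)) from rfl]
    by_cases hb : cv + 1 = side - 1
    · rw [sb_mod_boundary he ⟨1, by omega⟩, if_pos rfl,
        show PySem.Int.mod (0 + 1) 4 = 1 from rfl]
      right; left; refine ⟨by omega, by omega, rfl, by omega, by omega⟩
    · rw [if_neg (sb_mod_interior he (by omega) (by omega : cv + 1 < (0 + 1) * (side - 1)))]
      left; exact ⟨by omega, by omega, rfl, by omega, by omega⟩
  · -- edge 1, moving (-1,0)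
    simp only [show (PySem.List.pyGet? sbDirections 1).getD (0, 0) = ((-1 : Int), (0 : Int)) from rfl]
    by_cases hb : cv + 1 = 2 * (side - 1)
    · rw [sb_mod_boundary he ⟨2, by omega⟩, if_pos rfl,
        show PySem.Int.mod (1 + 1) 4 = 2 from rfl]
      right; right; left; refine ⟨by omega, by omega, rfl, by omega, by omega⟩
    · rw [if_neg (sb_mod_interior he (by omega) (by omega : cv + 1 < (1 + 1) * (side - 1)))]
      right; left; exact ⟨by omega, by omega, rfl, by omega, by omega⟩
  · -- edge 2, moving (0,1)
    simp only [show (PySem.List.pyGet? sbDirections 2).getD (0, 0) = ((0 : Int), (1 : Int)) from rfl]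
    by_cases hb : cv + 1 = 3 * (side - 1)
    · rw [sb_mod_boundary he ⟨3, by omega⟩, if_pos rfl,
        show PySem.Int.mod (2 + 1) 4 = 3 from rfl]
      right; right; right; refine ⟨by omega, by omega, rfl, by omega, by omega⟩
    · rw [if_neg (sb_mod_interior he (by omega) (by omega : cv + 1 < (2 + 1) * (side - 1)))]
      right; right; left; exact ⟨by omega, by omega, rfl, by omega, by omega⟩
  · -- edge 3, moving (1,0); the boundary cv+1 = 4*(side-1) is excluded by hcv
    simp only [show (PySem.List.pyGet? sbDirections 3).getD (0, 0) = ((1 : Int), (0 : Int)) from rfl]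
    rw [if_neg (sb_mod_interior he (by omega) (by omega : cv + 1 < (3 + 1) * (side - 1)))]
    right; right; right; exact ⟨by omega, by omega, rfl, by omega, by omega⟩

lemma sbLoop_eq (side g : Int) (hs : 2 ≤ side) (hg4 : g < 4 * (side - 1)) :
    ∀ (fuel : Nat) (cv cd i j : Int), cv ≤ g → g - cv < (fuel : Int) →
      SB_State side cv cd i j → sbLoop side g fuel cd i j cv = sbFinal side g := by
  intro fuel
  induction fuel with
  | zero => intro cv cd i j hle hf _; exfalso; omega
  | succ n ih =>
    intro cv cd i j hle hf hst
    by_cases hcv : cv = g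
    · rw [sbLoop, if_pos hcv, ← hcv]
      exact sb_state_final side cv cd i j hst
    · rw [sbLoop, if_neg hcv]
      exact ih (cv + 1) _ _ _ (by omega) (by push_cast at hf ⊢; omega)
        (sb_step side cv cd i j hs (by omega) hst)

lemma sb_alt_eq_final (side g : Int) (hs : 2 ≤ side) (hg0 : 0 ≤ g) (hg4 : g < 4 * (side - 1)) :
    (let e := side - 1
     let q := PySem.Int.floordiv g e
     let r := PySem.Int.mod g e
     if q = 0 then (e, e - r)
     else if q = 1 then (e - r, 0)
     else if q = 2 then ((0 : Int), r)
     else (r, e)) = sbFinal side g := by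
  have he : (0 : Int) < side - 1 := by omega
  have hm := PySem.Int.floordiv_mul_add_mod g (side - 1)
  simp only [sbFinal]
  by_cases h0 : g < side - 1
  · have hq : PySem.Int.floordiv g (side - 1) = 0 :=
      (PySem.Int.floordiv_eq_iff_of_pos he).mpr ⟨by omega, by omega⟩
    rw [hq] at hm ⊢
    rw [if_pos rfl, if_pos h0, Prod.mk.injEq]
    exact ⟨rfl, by omega⟩
  · by_cases h1 : g < 2 * (side - 1)
    · have hq : PySem.Int.floordiv g (side - 1) = 1 :=
        (PySem.Int.floordiv_eq_iff_of_pos he).mpr ⟨by omega, by omega⟩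
      rw [hq] at hm ⊢
      rw [if_neg (by norm_num), if_pos rfl, if_neg h0, if_pos h1, Prod.mk.injEq]
      exact ⟨by omega, rfl⟩
    · by_cases h2 : g < 3 * (side - 1)
      · have hq : PySem.Int.floordiv g (side - 1) = 2 :=
          (PySem.Int.floordiv_eq_iff_of_pos he).mpr ⟨by omega, by omega⟩
        rw [hq] at hm ⊢
        rw [if_neg (by norm_num), if_neg (by norm_num), if_pos rfl,
          if_neg h0, if_neg h1, if_pos h2, Prod.mk.injEq]
        exact ⟨rfl, by omega⟩
      · have hq : PySem.Int.floordiv g (side - 1) = 3 :=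
          (PySem.Int.floordiv_eq_iff_of_pos he).mpr ⟨by omega, by omega⟩
        rw [hq] at hm ⊢
        rw [if_neg (by norm_num), if_neg (by norm_num), if_neg (by norm_num),
          if_neg h0, if_neg h1, if_neg h2, Prod.mk.injEq]
        exact ⟨by omega, rfl⟩

-- ===== VERDICT (by name: the statement is the Claim_ definition above) =====
theorem square_board_spec : Claim_equal_square_board := by
  intro side token steps _ hpre
  have hs : (2 : Int) ≤ side := hpre
  have he : (0 : Int) < side - 1 := by omega
  have h4 : (0 : Int) < 4 * (side - 1) := by omega
  have hg0 : 0 ≤ PySem.Int.mod (steps + token) (4 * (side - 1)) :=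
    PySem.Int.mod_nonneg _ h4
  have hg4 : PySem.Int.mod (steps + token) (4 * (side - 1)) < 4 * (side - 1) :=
    PySem.Int.mod_lt _ h4
  have hmv : 2 * side + 2 * (side - 2) = 4 * (side - 1) := by ring
  show square_board side token steps = square_board_alt side token steps
  unfold square_board square_board_alt
  simp only [hmv]
  rw [abs_of_nonneg hg0]
  set g := PySem.Int.mod (steps + token) (4 * (side - 1)) with hgdef
  rw [sbLoop_eq side g hs hg4 (g.toNat + 1) 0 0 (side - 1) (side - 1) hg0
    (by push_cast; omega)
    (Or.inl ⟨le_refl 0, he, rfl, rfl, by omega⟩)]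
  exact (sb_alt_eq_final side g hs hg0 hg4).symm
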